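-- pv_equiv track=rewrite | github.com/slayer/duoauthproxy-freebsd | duoauthproxy-5.0.0-b03e68d-src/pkgs/duoauthproxy/duoauthproxy/lib/validation/config/config_value_tools.py | is_valid_permutation
-- ===== SOURCE A (Python) =====
-- def is_valid_permutation(value, enum, separator=",", repeats=False):
--     """
--     Check the validity of a string which should contain a list of seperated
--     values which are all in a given enumerated list
--
--     Args:
--     config (ConfigDict): the section config to check
--     key (str): key for the permutation string
--     enum ([str]): enumerated list of values which can be in the permutation
--     separator: (str): character separating items in permutation
--     repeats: whether the permutation allows the same enum value to be present more than once
--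
--     Returns:
--         Bool: whether or not he permutation is well formatted
--
--     Example:
--         factors=phone, push
--         toolbox.test_valid_permutation(config, 'factors', ['push', 'phone', 'passcode'], ',', False)
--
--         return true
--     """
--
--     seen = []
--     for item in value.split(separator):
--         if item.strip() not in enum:
--             return False
--         if repeats is False and item in seen:
--             return False
--         seen.append(item)
--
--     return True
-- ===== SOURCE B (Python) =====
-- def is_valid_permutation(value, enum, separator=",", repeats=False):
--     items = value.split(separator)
--     if any(item.strip() not in enum for item in items):
--         return False
--     if repeats is False and len(items) != len(set(items)):
--         return False
--     return True
-- ===== Notes on version B (the rewrite author's own statement) =====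
-- stated objective: idiomatic
-- what changed: Replaces the single interleaved loop with its incremental 'seen' list by two separate whole-list checks: an any() membership pass over stripped items, then duplicate detection by comparing len(items) with len(set(items)).
-- outside the precondition, e.g. on is_valid_permutation('a', ['a'], '', False): A raises ValueError, B raises ValueError
import Mathlib
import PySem

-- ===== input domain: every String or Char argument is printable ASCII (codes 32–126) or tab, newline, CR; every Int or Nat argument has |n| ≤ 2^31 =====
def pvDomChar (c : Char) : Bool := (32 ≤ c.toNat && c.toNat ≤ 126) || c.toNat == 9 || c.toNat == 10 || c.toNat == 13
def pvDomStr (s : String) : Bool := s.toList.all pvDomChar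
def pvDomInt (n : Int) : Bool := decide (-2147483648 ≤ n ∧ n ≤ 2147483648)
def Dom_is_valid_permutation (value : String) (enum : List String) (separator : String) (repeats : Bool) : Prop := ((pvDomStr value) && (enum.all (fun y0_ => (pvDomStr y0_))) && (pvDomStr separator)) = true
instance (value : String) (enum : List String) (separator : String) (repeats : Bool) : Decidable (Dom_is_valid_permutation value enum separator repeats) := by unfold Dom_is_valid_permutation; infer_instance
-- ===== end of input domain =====

-- B replaces A's single interleaved loop (with its incremental 'seen' list) by two separate
-- whole-list checks: an any-pass for membership of stripped items, then set-size duplicate detection.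

-- ===== PORT A =====
-- the for-loop of A: state is the 'seen' list, early return on a failing item
def pvGoA (enum : List String) (repeats : Bool) : List String → List String → Bool
  | _, [] => true
  | seen, item :: rest =>
    if !(enum.contains (PySem.Str.strip item)) then false
    else if repeats = false && seen.contains item then false
    else pvGoA enum repeats (seen ++ [item]) rest

def is_valid_permutation (value : String) (enum : List String) (separator : String) (repeats : Bool) : Bool :=
  pvGoA enum repeats [] ((PySem.Str.split? value separator).getD [])

-- ===== PORT B =====
def is_valid_permutation_alt (value : String) (enum : List String) (separator : String) (repeats : Bool) : Bool :=
  let items := (PySem.Str.split? value separator).getD []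
  if items.any (fun item => !(enum.contains (PySem.Str.strip item))) then false
  else if repeats = false && !(items.length = (PySem.Set.ofList items).length) then false
  else true

-- ===== PRECONDITION & SPEC =====
-- Python's str.split raises ValueError on an empty separator; both programs raise there.
def Pre_is_valid_permutation (value : String) (enum : List String) (separator : String) (repeats : Bool) : Prop := separator ≠ ""
instance (value : String) (enum : List String) (separator : String) (repeats : Bool) : Decidable (Pre_is_valid_permutation value enum separator repeats) := by unfold Pre_is_valid_permutation; infer_instance
def pvWitness_is_valid_permutation : String × List String × String × Bool := ("a,b", ["a", "b"], ",", false)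

def Spec_is_valid_permutation (value : String) (enum : List String) (separator : String) (repeats : Bool) (out : Bool) : Prop := out = is_valid_permutation_alt value enum separator repeats
instance (value : String) (enum : List String) (separator : String) (repeats : Bool) (out : Bool) : Decidable (Spec_is_valid_permutation value enum separator repeats out) := by unfold Spec_is_valid_permutation; infer_instance

-- ===== CLAIM (what is proved, stated in full; the proofs are below) =====
def Claim_equal_is_valid_permutation : Prop := ∀ (value : String) (enum : List String) (separator : String) (repeats : Bool), Dom_is_valid_permutation value enum separator repeats → Pre_is_valid_permutation value enum separator repeats → Spec_is_valid_permutation value enum separator repeats (is_valid_permutation value enum separator repeats)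

-- ===== LEMMAS AND PROOFS =====

theorem pv_foldl_add_len_le (l s : List String) :
    (l.foldl PySem.Set.add s).length ≤ s.length + l.length := by
  induction l generalizing s with
  | nil => simp
  | cons x l ih =>
    simp only [List.foldl_cons, List.length_cons]
    have h := ih (PySem.Set.add s x)
    have : (PySem.Set.add s x).length ≤ s.length + 1 := by
      unfold PySem.Set.add
      split <;> simp
    omega

theorem pv_foldl_add_eq_append (l : List String) : ∀ (s : List String), l.Nodup → (∀ x ∈ l, x ∉ s) →
    l.foldl PySem.Set.add s = s ++ l := by
  induction l with
  | nil => simp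
  | cons x l ih =>
    intro s h hf
    simp only [List.foldl_cons]
    have hx : x ∉ s := hf x (by simp)
    have hadd : PySem.Set.add s x = s ++ [x] := by
      unfold PySem.Set.add
      simp [hx]
    rw [hadd, ih (s ++ [x]) (List.Nodup.of_cons h) ?_]
    · simp
    · intro y hy
      simp only [List.mem_append, List.mem_singleton, not_or]
      exact ⟨fun h1 => hf y (by simp [hy]) h1, fun h2 => (List.nodup_cons.mp h).1 (h2 ▸ hy)⟩

theorem pv_foldl_add_len_lt (l : List String) : ∀ (s : List String), ¬ (l.Nodup ∧ ∀ x ∈ l, x ∉ s) →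
    (l.foldl PySem.Set.add s).length < s.length + l.length := by
  induction l with
  | nil => intro s h; simp at h
  | cons x l ih =>
    intro s h
    simp only [List.foldl_cons, List.length_cons]
    by_cases hx : x ∈ s
    · have heq : PySem.Set.add s x = s := by unfold PySem.Set.add; simp [hx]
      rw [heq]
      have := pv_foldl_add_len_le l s
      omega
    · have heq : PySem.Set.add s x = s ++ [x] := by unfold PySem.Set.add; simp [hx]
      rw [heq]
      have h' : ¬ (l.Nodup ∧ ∀ y ∈ l, y ∉ s ++ [x]) := by
        rintro ⟨hnd, hfr⟩
        apply h
        refine ⟨List.nodup_cons.mpr ⟨fun hxl => hfr x hxl (by simp), hnd⟩, ?_⟩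
        intro y hy
        rcases List.mem_cons.mp hy with rfl | hy'
        · exact hx
        · exact fun hys => hfr y hy' (by simp [hys])
      have := ih (s ++ [x]) h'
      simp only [List.length_append, List.length_cons, List.length_nil] at this
      omega

theorem pv_ofList_len_eq_iff (l : List String) :
    (l.length = (PySem.Set.ofList l).length) ↔ l.Nodup := by
  rw [PySem.Set.ofList_eq_foldl]
  constructor
  · intro h
    by_contra hnd
    have := pv_foldl_add_len_lt l [] (by simp [hnd])
    simp only [List.length_nil, Nat.zero_add] at this
    omega
  · intro h
    rw [pv_foldl_add_eq_append l [] h (by simp)]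
    simp

-- characterisation of A's loop: membership of every item, and (when repeats is false)
-- freshness w.r.t. 'seen' plus no internal duplicates
theorem pv_goA_iff (enum : List String) (repeats : Bool) :
    ∀ (items seen : List String),
    pvGoA enum repeats seen items = true ↔
      ((∀ i ∈ items, PySem.Str.strip i ∈ enum) ∧
        (repeats = true ∨ ((∀ i ∈ items, i ∉ seen) ∧ items.Nodup)))
  | [], seen => by simp [pvGoA]
  | x :: rest, seen => by
    have ih := pv_goA_iff enum repeats rest (seen ++ [x])
    by_cases hm : PySem.Str.strip x ∈ enum
    · cases repeats with
      | true =>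
        rw [show pvGoA enum true seen (x :: rest) = pvGoA enum true (seen ++ [x]) rest by
              simp [pvGoA, List.contains_iff_mem, hm], ih]
        simp [hm]
      | false =>
        by_cases hs : x ∈ seen
        · simp [pvGoA, List.contains_iff_mem, hm, hs]
        · rw [show pvGoA enum false seen (x :: rest) = pvGoA enum false (seen ++ [x]) rest by
                simp [pvGoA, List.contains_iff_mem, hm, hs], ih]
          simp only [Bool.false_eq_true, false_or, List.mem_cons, List.mem_append,
            List.mem_singleton, not_or, List.nodup_cons, forall_eq_or_imp, hm, true_and, hs,
            not_false_iff]
          constructor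
          · rintro ⟨h1, h2, h3⟩
            exact ⟨h1, fun a ha => (h2 a ha).1, fun hxr => (h2 x hxr).2.1 rfl, h3⟩
          · rintro ⟨h1, h2, h3, h4⟩
            exact ⟨h1, fun i hi => ⟨h2 i hi, fun he => h3 (he ▸ hi), List.not_mem_nil⟩, h4⟩
    · simp [pvGoA, List.contains_iff_mem, hm]

-- ===== VERDICT (by name: the statement is the Claim_ definition above) =====
theorem is_valid_permutation_spec : Claim_equal_is_valid_permutation := by
  intro value enum separator repeats _ _
  unfold Spec_is_valid_permutation is_valid_permutation is_valid_permutation_alt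
  set items := (PySem.Str.split? value separator).getD [] with hitems
  rw [Bool.eq_iff_iff, pv_goA_iff]
  have hmem : (items.any fun item => !enum.contains (PySem.Str.strip item)) = false ↔
      (∀ i ∈ items, PySem.Str.strip i ∈ enum) := by
    simp [List.any_eq_false, List.contains_iff_mem]
  by_cases hanyb : (items.any fun item => !enum.contains (PySem.Str.strip item)) = true
  · rw [if_pos hanyb]
    have hnall : ¬ ∀ i ∈ items, PySem.Str.strip i ∈ enum := by
      intro hc
      rw [hmem.mpr hc] at hanyb
      exact absurd hanyb (by simp)
    simp [hnall]
  · have hall := hmem.mp (Bool.eq_false_iff.mpr hanyb)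
    rw [if_neg hanyb]
    cases repeats with
    | true => simpa using hall
    | false =>
      by_cases hnd : items.Nodup
      · have hlen := (pv_ofList_len_eq_iff items).mpr hnd
        rw [if_neg (by simp [hlen])]
        simp [hnd]
        exact hall
      · have hlen : ¬ items.length = (PySem.Set.ofList items).length :=
          fun h => hnd ((pv_ofList_len_eq_iff items).mp h)
        rw [if_pos (by simp [hlen])]
        simp [hnd]
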